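-- pv_equiv track=rewrite | github.com/Markusbra/Softwaredesign | my_calendar.py | week_number
-- ===== SOURCE A (Python) =====
-- def is_leap_year(year: int) -> bool:
--     """
--     Return True if the given year is a leap year in the Gregorian calendar.
--
--     Rules:
--     - divisible by 4 and not divisible by 100, OR divisible by 400
--
--     Args:
--         year: Year number (e.g. 2024)
--
--     Returns:
--         True if leap year, otherwise False.
--     """
--     return (year % 4 == 0 and year % 100 != 0) or (year % 400 == 0)
--
-- def week_number(day: int, month: int, year: int) -> int:
--     """
--     Return an approximate week number for the given date using a simple approach:
--     compute day-of-year and divide by 7.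
--
--     Args:
--         day: Day of month (1..31)
--         month: Month (1..12)
--         year: Year
--
--     Returns:
--         Week number as integer (starting at 0 for the first partial week).
--     """
--     # month lengths (non-leap)
--     month_len = {
--         1: 31, 2: 28, 3: 31, 4: 30,
--         5: 31, 6: 30, 7: 31, 8: 31,
--         9: 30, 10: 31, 11: 30, 12: 31
--     }
--
--     if is_leap_year(year):
--         month_len[2] = 29
--
--     day_of_year = day + sum(month_len[m] for m in range(1, month))
--     return day_of_year // 7
-- ===== SOURCE B (Python) =====
-- def week_number(day: int, month: int, year: int) -> int:
--     # days before the start of each month in a non-leap year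
--     days_before = {1: 0, 2: 31, 3: 59, 4: 90, 5: 120, 6: 151,
--                    7: 181, 8: 212, 9: 243, 10: 273, 11: 304, 12: 334}
--     leap = (year % 4 == 0 and year % 100 != 0) or (year % 400 == 0)
--     day_of_year = day + days_before[month] + (1 if leap and month > 2 else 0)
--     return day_of_year // 7
-- ===== Notes on version B (the rewrite author's own statement) =====
-- stated objective: simpler
-- what changed: Replaces A's per-call summation loop over month lengths (with an in-place leap mutation of the dict) by one lookup in a precomputed days-before-month table plus an explicit leap adjustment for month > 2; Pre_ excludes months outside 1..12, where A's empty-sum value (month <= 0) and its sum-of-all-months value (month = 13) are accidents of range() and B's table lookup raises KeyError.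
-- outside the precondition, e.g. on week_number(5, 0, 2024): A returns 0, B raises KeyError; on week_number(5, 13, 2024): A returns 53, B raises KeyError; on week_number(5, 14, 2024): A raises KeyError, B raises KeyError
import Mathlib
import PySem

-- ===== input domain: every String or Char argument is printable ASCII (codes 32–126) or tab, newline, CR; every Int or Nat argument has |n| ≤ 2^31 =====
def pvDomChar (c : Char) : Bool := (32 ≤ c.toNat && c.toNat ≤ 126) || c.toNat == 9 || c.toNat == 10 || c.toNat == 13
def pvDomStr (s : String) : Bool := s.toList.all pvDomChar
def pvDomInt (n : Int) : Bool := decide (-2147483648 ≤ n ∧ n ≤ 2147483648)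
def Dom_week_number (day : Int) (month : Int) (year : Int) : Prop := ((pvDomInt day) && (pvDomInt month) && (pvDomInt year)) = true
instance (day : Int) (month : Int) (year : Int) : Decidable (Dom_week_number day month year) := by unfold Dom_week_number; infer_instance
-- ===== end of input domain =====

-- B replaces A's per-call summation loop by one lookup in a precomputed days-before-month
-- table plus an explicit leap adjustment (objective: simpler).

-- ===== PORT A =====
def is_leap_year (year : Int) : Bool :=
  (PySem.Int.mod year 4 == 0 && PySem.Int.mod year 100 != 0) || PySem.Int.mod year 400 == 0

def week_number (day : Int) (month : Int) (year : Int) : Int :=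
  let month_len : PySem.Dict Int Int :=
    PySem.Dict.ofList [(1,31),(2,28),(3,31),(4,30),(5,31),(6,30),(7,31),(8,31),(9,30),(10,31),(11,30),(12,31)]
  let month_len := if is_leap_year year then month_len.insert 2 29 else month_len
  -- month_len[m] always hits for m in range(1, month) under Pre_ (month ≤ 12); getD 0 stands for the lookup
  let day_of_year := day + (PySem.List.pyRange 1 month 1).foldl (fun acc m => acc + month_len.getD m 0) 0
  PySem.Int.floordiv day_of_year 7

-- ===== PORT B =====
def week_number_alt (day : Int) (month : Int) (year : Int) : Int :=
  let days_before : PySem.Dict Int Int :=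
    PySem.Dict.ofList [(1,0),(2,31),(3,59),(4,90),(5,120),(6,151),(7,181),(8,212),(9,243),(10,273),(11,304),(12,334)]
  let leap := (PySem.Int.mod year 4 == 0 && PySem.Int.mod year 100 != 0) || PySem.Int.mod year 400 == 0
  -- days_before[month] always hits for 1 ≤ month ≤ 12 under Pre_; getD 0 stands for the lookup
  let day_of_year := day + days_before.getD month 0 + (if leap && month > 2 then (1:Int) else 0)
  PySem.Int.floordiv day_of_year 7

-- ===== PRECONDITION & SPEC =====
-- Pre_ admits only real months 1..12: outside, B's table lookup raises KeyError, while A's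
-- values there (the empty-sum value for month ≤ 0, the sum-of-all-months value for month = 13)
-- are accidents of range(), and A itself raises KeyError for month ≥ 14.
def Pre_week_number (day : Int) (month : Int) (year : Int) : Prop := 1 ≤ month ∧ month ≤ 12
instance (day : Int) (month : Int) (year : Int) : Decidable (Pre_week_number day month year) := by unfold Pre_week_number; infer_instance
def pvWitness_week_number : Int × Int × Int := (15, 3, 2024)

def Spec_week_number (day : Int) (month : Int) (year : Int) (out : Int) : Prop := out = week_number_alt day month year
instance (day : Int) (month : Int) (year : Int) (out : Int) : Decidable (Spec_week_number day month year out) := by unfold Spec_week_number; infer_instance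

-- ===== CLAIM (what is proved, stated in full; the proofs are below) =====
def Claim_equal_week_number : Prop := ∀ (day : Int) (month : Int) (year : Int), Dom_week_number day month year → Pre_week_number day month year → Spec_week_number day month year (week_number day month year)

-- ===== LEMMAS AND PROOFS =====
def pvMl (b : Bool) : PySem.Dict Int Int :=
  let d : PySem.Dict Int Int :=
    PySem.Dict.ofList [(1,31),(2,28),(3,31),(4,30),(5,31),(6,30),(7,31),(8,31),(9,30),(10,31),(11,30),(12,31)]
  if b then d.insert 2 29 else d

def pvPrefixT : PySem.Dict Int Int :=
  PySem.Dict.ofList [(1,0),(2,31),(3,59),(4,90),(5,120),(6,151),(7,181),(8,212),(9,243),(10,273),(11,304),(12,334)]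

-- A's loop-sum of month lengths equals B's table lookup plus leap adjustment, for 1 ≤ month ≤ 12
theorem pv_sum_eq (month : Int) (h1 : 1 ≤ month) (h2 : month ≤ 12) (b : Bool) :
    (PySem.List.pyRange 1 month 1).foldl (fun acc m => acc + (pvMl b).getD m 0) 0
      = pvPrefixT.getD month 0 + (if b && decide (month > 2) then (1:Int) else 0) := by
  interval_cases month <;> cases b <;> decide

-- ===== VERDICT (by name: the statement is the Claim_ definition above) =====
theorem week_number_spec : Claim_equal_week_number := by
  intro day month year _ hp
  unfold Spec_week_number week_number week_number_alt
  have hb : ((PySem.Int.mod year 4 == 0 && PySem.Int.mod year 100 != 0) || PySem.Int.mod year 400 == 0)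
      = is_leap_year year := rfl
  simp only [hb]
  rw [show (fun acc m => acc + (PySem.Dict.ofList [((1:Int),(31:Int)),(2,28),(3,31),(4,30),(5,31),(6,30),(7,31),(8,31),(9,30),(10,31),(11,30),(12,31)] |> fun d => if is_leap_year year then d.insert 2 29 else d).getD m 0) = (fun acc m => acc + (pvMl (is_leap_year year)).getD m 0) from rfl]
  rw [pv_sum_eq month hp.1 hp.2 (is_leap_year year)]
  rw [show pvPrefixT = PySem.Dict.ofList [((1:Int),(0:Int)),(2,31),(3,59),(4,90),(5,120),(6,151),(7,181),(8,212),(9,243),(10,273),(11,304),(12,334)] from rfl]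
  congr 1
  ring
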